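-- pv_equiv track=rewrite | github.com/Yeom-Yeom/CodingTest_Practice | Lv.1/page2/min_rect.py | min_rect
-- ===== SOURCE A (Python) =====
-- def min_rect(sizes):
--     w,h=0,0
--     for i in sizes:
--         i = sorted(i)
--         if w < i[0]:
--             w = i[0]
--         if h < i[1]:
--             h = i[1]
--     return w*h
-- ===== SOURCE B (Python) =====
-- def _two_smallest(card):
--     it = iter(card)
--     a = next(it)
--     b = next(it)
--     if b < a:
--         a, b = b, a
--     for x in it:
--         if x < a:
--             a, b = x, a
--         elif x < b:
--             b = x
--     return a, b
--
--
-- def min_rect(sizes):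
--     pairs = [_two_smallest(card) for card in sizes]
--     w = max([0] + [p[0] for p in pairs])
--     h = max([0] + [p[1] for p in pairs])
--     return w * h
-- ===== Notes on version B (the rewrite author's own statement) =====
-- stated objective: alternative
-- what changed: Replaces the interleaved sort-each-card-and-update loop by a per-card one-pass two-smallest tracker (no sorting) followed by two independent map/reduce maxima clamped at 0.
import Mathlib
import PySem

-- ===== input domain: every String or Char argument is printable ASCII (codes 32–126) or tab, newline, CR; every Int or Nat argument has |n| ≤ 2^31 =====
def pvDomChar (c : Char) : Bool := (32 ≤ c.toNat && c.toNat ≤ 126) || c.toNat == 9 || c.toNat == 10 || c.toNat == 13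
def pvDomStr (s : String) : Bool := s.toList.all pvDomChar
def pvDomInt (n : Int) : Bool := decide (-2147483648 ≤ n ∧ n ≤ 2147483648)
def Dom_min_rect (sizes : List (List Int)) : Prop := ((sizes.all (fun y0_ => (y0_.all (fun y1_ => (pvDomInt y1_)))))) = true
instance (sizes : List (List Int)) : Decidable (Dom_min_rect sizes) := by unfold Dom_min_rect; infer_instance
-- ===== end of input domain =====

-- B replaces A's sort-each-card-and-update loop by a one-pass two-smallest tracker per card
-- plus two independent map/reduce maxima (objective: alternative algorithm, no sorting).


-- ===== PORT A =====
-- for-loop over sizes carrying (w, h); each step sorts the card and reads i[0], i[1]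
-- (pyGet? = none is Python's IndexError on a card shorter than 2: the loop aborts with none,
-- excluded by Pre_ below; `.getD 0` at top level is never reached inside Pre_).
def minRectLoopA : List (List Int) → Int → Int → Option Int
  | [], w, h => some (w * h)
  | i :: rest, w, h =>
    let s := PySem.List.sorted i (fun x => x) false
    match PySem.List.pyGet? s 0, PySem.List.pyGet? s 1 with
    | some s0, some s1 =>
        minRectLoopA rest (if w < s0 then s0 else w) (if h < s1 then s1 else h)
    | _, _ => none

def min_rect (sizes : List (List Int)) : Int :=
  (minRectLoopA sizes 0 0).getD 0

-- ===== PORT B =====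
-- _two_smallest: one pass keeping the two smallest values seen so far (none = StopIteration
-- on a card shorter than 2, excluded by Pre_ below).
def twoSmallest (card : List Int) : Option (Int × Int) :=
  match card with
  | a :: b :: rest =>
      let p0 := if b < a then (b, a) else (a, b)
      some (rest.foldl
        (fun p x => if x < p.1 then (x, p.1) else if x < p.2 then (p.1, x) else p) p0)
  | _ => none

def min_rect_alt (sizes : List (List Int)) : Int :=
  match sizes.mapM twoSmallest with
  | some pairs =>
      let w := (pairs.map (fun p => p.1)).foldl max 0      -- max([0] + [p[0] for p in pairs])
      let h := (pairs.map (fun p => p.2)).foldl max 0      -- max([0] + [p[1] for p in pairs])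
      w * h
  | none => 0

-- ===== PRECONDITION & SPEC =====
-- Pre_ excludes exactly the inputs where A raises IndexError (a card with fewer than
-- two entries); B raises StopIteration there too.
def Pre_min_rect (sizes : List (List Int)) : Prop := ∀ i ∈ sizes, 2 ≤ i.length
instance (sizes : List (List Int)) : Decidable (Pre_min_rect sizes) := by unfold Pre_min_rect; infer_instance

def pvWitness_min_rect : List (List Int) := [[1, 2], [4, 3]]

def Spec_min_rect (sizes : List (List Int)) (out : Int) : Prop := out = min_rect_alt sizes
instance (sizes : List (List Int)) (out : Int) : Decidable (Spec_min_rect sizes out) := by unfold Spec_min_rect; infer_instance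

-- ===== CLAIM (what is proved, stated in full; the proofs are below) =====
def Claim_equal_min_rect : Prop := ∀ (sizes : List (List Int)), Dom_min_rect sizes → Pre_min_rect sizes → Spec_min_rect sizes (min_rect sizes)

-- ===== LEMMAS AND PROOFS =====

-- the per-element step of B's tracker
def tsStep (p : Int × Int) (x : Int) : Int × Int :=
  if x < p.1 then (x, p.1) else if x < p.2 then (p.1, x) else p

-- the insertion function underlying PySem.List.sorted with the identity key
def insLt (x : Int) (ys : List Int) : List Int :=
  PySem.List.insertBy (fun a b => decide (a < b)) x ys

theorem insLt_pairwise (x : Int) (t : List Int) (h : t.Pairwise (· ≤ ·)) :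
    (insLt x t).Pairwise (· ≤ ·) := by
  induction t with
  | nil => simp [insLt, PySem.List.insertBy]
  | cons y ys ih =>
    rcases List.pairwise_cons.mp h with ⟨hy, hys⟩
    by_cases hxy : x < y
    · simp only [insLt, PySem.List.insertBy, hxy, decide_true, if_pos]
      refine List.pairwise_cons.mpr ⟨?_, h⟩
      intro z hz
      rcases List.mem_cons.mp hz with rfl | hz
      · omega
      · exact le_trans (le_of_lt hxy) (hy z hz)
    · simp only [insLt, PySem.List.insertBy, hxy, decide_false]
      refine List.pairwise_cons.mpr ⟨?_, ih hys⟩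
      intro z hz
      rcases (PySem.List.mem_insertBy (before := fun a b => decide (a < b)) x z ys).mp hz with rfl | hz'
      · omega
      · exact hy z hz'

theorem foldl_insLt_shape (rest : List Int) :
    ∀ (a b : Int) (t : List Int), (a :: b :: t).Pairwise (· ≤ ·) →
    ∃ t', rest.foldl (fun acc x => insLt x acc) (a :: b :: t)
            = (rest.foldl tsStep (a, b)).1 :: (rest.foldl tsStep (a, b)).2 :: t'
          ∧ ((rest.foldl tsStep (a, b)).1 :: (rest.foldl tsStep (a, b)).2 :: t').Pairwise (· ≤ ·) := by
  induction rest with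
  | nil => intro a b t h; exact ⟨t, rfl, h⟩
  | cons x xs ih =>
    intro a b t h
    rcases List.pairwise_cons.mp h with ⟨ha, h'⟩
    rcases List.pairwise_cons.mp h' with ⟨hb, ht⟩
    have hab : a ≤ b := ha b (List.mem_cons_self ..)
    by_cases h1 : x < a
    · have hins : insLt x (a :: b :: t) = x :: a :: b :: t := by
        simp [insLt, PySem.List.insertBy, h1]
      have hstep : tsStep (a, b) x = (x, a) := by simp [tsStep, h1]
      have hp : (x :: a :: b :: t).Pairwise (· ≤ ·) := by
        refine List.pairwise_cons.mpr ⟨?_, h⟩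
        intro z hz
        rcases List.mem_cons.mp hz with rfl | hz
        · omega
        · rcases List.mem_cons.mp hz with rfl | hz
          · omega
          · have := hb z hz; omega
      simpa [List.foldl_cons, hins, hstep] using ih x a (b :: t) hp
    · by_cases h2 : x < b
      · have hins : insLt x (a :: b :: t) = a :: x :: b :: t := by
          simp [insLt, PySem.List.insertBy, h1, h2]
        have hstep : tsStep (a, b) x = (a, x) := by simp [tsStep, h1, h2]
        have hp : (a :: x :: b :: t).Pairwise (· ≤ ·) := by
          refine List.pairwise_cons.mpr ⟨?_, List.pairwise_cons.mpr ⟨?_, h'⟩⟩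
          · intro z hz
            rcases List.mem_cons.mp hz with rfl | hz
            · omega
            · exact ha z hz
          · intro z hz
            rcases List.mem_cons.mp hz with rfl | hz
            · omega
            · have := hb z hz; omega
        simpa [List.foldl_cons, hins, hstep] using ih a x (b :: t) hp
      · have hins : insLt x (a :: b :: t) = a :: b :: insLt x t := by
          simp [insLt, PySem.List.insertBy, h1, h2]
        have hstep : tsStep (a, b) x = (a, b) := by simp [tsStep, h1, h2]
        have hp : (a :: b :: insLt x t).Pairwise (· ≤ ·) := by
          refine List.pairwise_cons.mpr ⟨?_, List.pairwise_cons.mpr ⟨?_, insLt_pairwise x t ht⟩⟩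
          · intro z hz
            rcases List.mem_cons.mp hz with rfl | hz
            · omega
            · rcases (PySem.List.mem_insertBy (before := fun a b => decide (a < b)) x z t).mp hz with rfl | hz'
              · omega
              · exact ha z (List.mem_cons_of_mem _ hz')
          · intro z hz
            rcases (PySem.List.mem_insertBy (before := fun a b => decide (a < b)) x z t).mp hz with rfl | hz'
            · omega
            · exact hb z hz'
        simpa [List.foldl_cons, hins, hstep] using ih a b (insLt x t) hp

-- a card's sorted form starts with exactly the pair B's tracker computes
theorem sorted_head2 (a b : Int) (rest : List Int) :
    ∃ c d t', twoSmallest (a :: b :: rest) = some (c, d)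
      ∧ PySem.List.sorted (a :: b :: rest) (fun x => x) false = c :: d :: t' := by
  set p0 : Int × Int := if b < a then (b, a) else (a, b) with hp0
  have hpw : (p0.1 :: p0.2 :: ([] : List Int)).Pairwise (· ≤ ·) := by
    by_cases hba : b < a <;> simp [hp0, hba] <;> omega
  obtain ⟨t', ht', _⟩ := foldl_insLt_shape rest p0.1 p0.2 [] hpw
  refine ⟨(rest.foldl tsStep (p0.1, p0.2)).1, (rest.foldl tsStep (p0.1, p0.2)).2, t', ?_, ?_⟩
  · show twoSmallest (a :: b :: rest) = some (rest.foldl tsStep (p0.1, p0.2))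
    simp only [twoSmallest, ← hp0]
    rfl
  · have hsort : PySem.List.sorted (a :: b :: rest) (fun x => x) false
        = rest.foldl (fun acc x => insLt x acc) (insLt b (insLt a [])) := rfl
    have hbase : insLt b (insLt a []) = p0.1 :: p0.2 :: [] := by
      by_cases hba : b < a <;> simp [insLt, PySem.List.insertBy, hba, hp0]
    rw [hsort, hbase, ht']

-- canonical value of a card: the pair B's tracker returns (total on Pre_ cards)
def ts (card : List Int) : Int × Int := (twoSmallest card).getD (0, 0)

theorem twoSmallest_eq_ts (card : List Int) (h : 2 ≤ card.length) :
    twoSmallest card = some (ts card) := by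
  match card, h with
  | a :: b :: rest, _ => simp [ts, twoSmallest]

-- A's loop computes the pair of running maxima of ts over the cards
theorem loopA_eq (sizes : List (List Int)) :
    ∀ (w h : Int), (∀ i ∈ sizes, 2 ≤ i.length) →
    minRectLoopA sizes w h
      = some ((sizes.foldl (fun acc i => max acc (ts i).1) w)
              * (sizes.foldl (fun acc i => max acc (ts i).2) h)) := by
  induction sizes with
  | nil => intro w h _; simp [minRectLoopA]
  | cons i rest ih =>
    intro w h hlen
    have hi : 2 ≤ i.length := hlen i (List.mem_cons_self ..)
    match i, hi with
    | a :: b :: r, _ =>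
      obtain ⟨c, d, t', hts, hs⟩ := sorted_head2 a b r
      have hts' : ts (a :: b :: r) = (c, d) := by simp [ts, hts]
      have hrest : ∀ j ∈ rest, 2 ≤ j.length := fun j hj => hlen j (List.mem_cons_of_mem _ hj)
      have hget0 : PySem.List.pyGet? (PySem.List.sorted (a :: b :: r) (fun x => x) false) 0 = some c := by
        rw [hs]; exact PySem.List.pyGet?_zero_cons ..
      have hget1 : PySem.List.pyGet? (PySem.List.sorted (a :: b :: r) (fun x => x) false) 1 = some d := by
        rw [hs]
        have h1 : (1 : Int) = ((0 : Nat) : Int) + 1 := by norm_num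
        rw [h1, PySem.List.pyGet?_cons_succ]
        exact PySem.List.pyGet?_zero_cons ..
      have hw : (if w < c then c else w) = max w c := by omega
      have hh : (if h < d then d else h) = max h d := by omega
      simp only [minRectLoopA, hget0, hget1, hw, hh, List.foldl_cons, hts']
      exact ih (max w c) (max h d) hrest

-- B's mapM succeeds and yields the list of ts values
theorem mapM_twoSmallest (sizes : List (List Int)) (h : ∀ i ∈ sizes, 2 ≤ i.length) :
    sizes.mapM twoSmallest = some (sizes.map ts) := by
  induction sizes with
  | nil => rfl
  | cons i rest ih =>
    have hi := twoSmallest_eq_ts i (h i (List.mem_cons_self ..))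
    have hr := ih (fun j hj => h j (List.mem_cons_of_mem _ hj))
    simp [List.mapM_cons, hi, hr]

-- ===== VERDICT (by name: the statement is the Claim_ definition above) =====
theorem min_rect_spec : Claim_equal_min_rect := by
  intro sizes _ hpre
  unfold Spec_min_rect min_rect min_rect_alt
  rw [mapM_twoSmallest sizes hpre, loopA_eq sizes 0 0 hpre]
  simp [List.foldl_map]
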